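-- pv_equiv track=rewrite | github.com/oskarholmberg/AdventOfCode | 2018/src/Day_2.py | hasExactly
-- ===== SOURCE A (Python) =====
-- def hasExactly(string, count):
-- 	dictionary = dict.fromkeys(string, 0)
-- 	for c in string:
-- 		dictionary[c] += 1
-- 	for v in dictionary.values():
-- 		if v == count:
-- 			return True
-- 	return False
-- ===== SOURCE B (Python) =====
-- def hasExactly(string, count):
--     s = sorted(string)
--     n = len(s)
--     i = 0
--     while i < n:
--         j = i
--         while j < n and s[j] == s[i]:
--             j += 1
--         if j - i == count:
--             return True
--         i = j
--     return False
-- ===== Notes on version B (the rewrite author's own statement) =====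
-- stated objective: alternative
-- what changed: Replaces the dict-based frequency table with sort-then-scan: sort the characters and walk consecutive runs of equal characters, returning True as soon as a run's length equals count.
import Mathlib
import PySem

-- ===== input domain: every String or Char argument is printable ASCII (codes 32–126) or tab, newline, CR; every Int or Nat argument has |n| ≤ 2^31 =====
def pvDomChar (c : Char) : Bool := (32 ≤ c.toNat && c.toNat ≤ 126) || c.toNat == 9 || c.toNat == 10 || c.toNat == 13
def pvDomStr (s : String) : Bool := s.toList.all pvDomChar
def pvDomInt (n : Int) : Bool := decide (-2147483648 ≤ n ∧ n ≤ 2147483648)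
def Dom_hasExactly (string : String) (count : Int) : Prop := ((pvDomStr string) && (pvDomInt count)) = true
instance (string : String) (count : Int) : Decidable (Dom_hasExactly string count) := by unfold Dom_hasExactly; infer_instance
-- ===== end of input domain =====

-- B: sort-then-scan over runs of equal characters instead of A's dict frequency table (alternative algorithm, same results).

-- ===== PORT A =====
-- 'for v in dictionary.values(): if v == count: return True / return False'
def valuesScan (count : Int) : List Int → Bool
  | [] => false
  | v :: rest => if v == count then true else valuesScan count rest

def hasExactly (string : String) (count : Int) : Bool :=
  -- dictionary = dict.fromkeys(string, 0)
  let dictionary := string.toList.foldl (fun d c => d.insert c (0 : Int)) PySem.Dict.empty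
  -- for c in string: dictionary[c] += 1   (key always present, so getD's default is never used)
  let dictionary := string.toList.foldl (fun d c => d.insert c (d.getD c 0 + 1)) dictionary
  valuesScan count dictionary.values

-- ===== PORT B =====
-- the inner 'while j < n and s[j] == s[i]' advances over the run of chars equal to s[i];
-- run = that run minus its first element, j - i = 1 + run.length, and 'i = j' drops the run.
def runScan (count : Int) : List Char → Bool
  | [] => false
  | c :: rest =>
    let run := rest.takeWhile (fun x => x == c)
    if ((1 + run.length : Int) == count) then true
    else runScan count (rest.dropWhile (fun x => x == c))
termination_by l => l.length
decreasing_by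
  have := List.length_dropWhile_le (p := fun x => x == c) (l := rest)
  simp
  omega

def hasExactly_alt (string : String) (count : Int) : Bool :=
  runScan count (PySem.List.sorted string.toList (fun x => x) false)

-- ===== PRECONDITION & SPEC =====
def Spec_hasExactly (string : String) (count : Int) (out : Bool) : Prop := out = hasExactly_alt string count
instance (string : String) (count : Int) (out : Bool) : Decidable (Spec_hasExactly string count out) := by unfold Spec_hasExactly; infer_instance

-- ===== CLAIM (what is proved, stated in full; the proofs are below) =====
def Claim_equal_hasExactly : Prop := ∀ (string : String) (count : Int), Dom_hasExactly string count → Spec_hasExactly string count (hasExactly string count)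

-- ===== LEMMAS AND PROOFS =====

lemma valuesScan_eq_any (count : Int) (vs : List Int) :
    valuesScan count vs = vs.any (fun v => v == count) := by
  induction vs with
  | nil => rfl
  | cons v rest ih =>
    rw [valuesScan, List.any_cons, ih]
    cases h : (v == count) <;> simp_all

lemma getD_foldl_insert_zero (x : Char) :
    ∀ (l : List Char) (d : PySem.Dict Char Int), (∀ y, d.getD y 0 = 0) →
      (l.foldl (fun d c => d.insert c (0 : Int)) d).getD x 0 = 0 := by
  intro l
  induction l with
  | nil => intro d h; exact h x
  | cons c rest ih =>
    intro d h
    simp only [List.foldl_cons]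
    exact ih _ (fun y => by rw [PySem.Dict.getD_insert]; split <;> simp [h])

lemma hasExactly_true_iff (s : String) (count : Int) :
    hasExactly s count = true ↔ ∃ c ∈ s.toList, (s.toList.count c : Int) = count := by
  unfold hasExactly
  set l := s.toList with hl
  set d0 := l.foldl (fun d c => d.insert c (0 : Int)) PySem.Dict.empty with hd0
  set d := l.foldl (fun d c => d.insert c (d.getD c 0 + 1)) d0 with hd
  have hnd0 : d0.keys.Nodup := PySem.Dict.nodup_keys_foldl_insert l _ _ PySem.Dict.nodup_keys_empty
  have hnd : d.keys.Nodup := PySem.Dict.nodup_keys_foldl_insert l _ _ hnd0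
  have hget : ∀ k, d.getD k 0 = (l.count k : Int) := by
    intro k
    rw [hd, PySem.Dict.getD_foldl_insert_add_one,
      getD_foldl_insert_zero k l PySem.Dict.empty (fun y => PySem.Dict.getD_empty y 0)]
    ring
  have hkeys : ∀ k, k ∈ d.keys ↔ k ∈ l := by
    intro k
    rw [hd, PySem.Dict.keys_foldl_insert, PySem.Set.mem_update,
      hd0, PySem.Dict.keys_foldl_insert, PySem.Set.mem_update]
    simp [PySem.Dict.keys_empty]
  rw [valuesScan_eq_any, PySem.Dict.values_eq_map_keys d hnd 0]
  simp only [List.any_map, List.any_eq_true, Function.comp]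
  constructor
  · rintro ⟨k, hk, hkc⟩
    exact ⟨k, (hkeys k).mp hk, by have := hget k; simp_all⟩
  · rintro ⟨k, hk, hkc⟩
    exact ⟨k, (hkeys k).mpr hk, by have := hget k; simp_all⟩

-- head of dropWhile fails the predicate
lemma dropWhile_head_false {α : Type} (p : α → Bool) :
    ∀ (l : List α) (d : α) (ds : List α), l.dropWhile p = d :: ds → p d = false := by
  intro l
  induction l with
  | nil => intro d ds h; simp [List.dropWhile] at h
  | cons a t ih =>
    intro d ds h
    rw [List.dropWhile_cons] at h
    split at h
    · exact ih d ds h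
    · cases h; simp_all

lemma run_facts (c : Char) (rest : List Char) (hp : (c :: rest).Pairwise (· ≤ ·)) :
    (c :: rest).count c = 1 + (rest.takeWhile (fun x => x == c)).length ∧
    (rest.dropWhile (fun x => x == c)).Pairwise (· ≤ ·) ∧
    (∀ x ∈ rest.takeWhile (fun x => x == c), x = c) ∧
    (∀ x ∈ rest.dropWhile (fun x => x == c),
        x ≠ c ∧ (c :: rest).count x = (rest.dropWhile (fun x => x == c)).count x) := by
  obtain ⟨hple, hpr⟩ := List.pairwise_cons.mp hp
  set run := rest.takeWhile (fun x => x == c) with hrun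
  set drop := rest.dropWhile (fun x => x == c) with hdrop
  have hsplit : run ++ drop = rest := List.takeWhile_append_dropWhile
  have hrunc : ∀ x ∈ run, x = c := by
    intro x hx
    have := List.mem_takeWhile_imp hx
    simpa using this
  have hpd : drop.Pairwise (· ≤ ·) := hpr.sublist (List.dropWhile_sublist _)
  have hgt : ∀ x ∈ drop, c < x := by
    cases hcase : drop with
    | nil => simp
    | cons dhd dtl =>
      have hhdne : dhd ≠ c := by
        have := dropWhile_head_false (fun x => x == c) rest dhd dtl (hdrop ▸ hcase)
        simpa using this
      have hhdmem : dhd ∈ rest := by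
        rw [← hsplit, hcase]; simp
      have hhdgt : c < dhd := lt_of_le_of_ne (hple dhd hhdmem) (Ne.symm hhdne)
      intro x hx
      rcases List.mem_cons.mp hx with h | h
      · exact h ▸ hhdgt
      · have hle : dhd ≤ x := by
          rw [hcase] at hpd
          exact (List.pairwise_cons.mp hpd).1 x h
        exact lt_of_lt_of_le hhdgt hle
  have hcount_run : run.count c = run.length :=
    List.count_eq_length.mpr (fun b hb => (hrunc b hb).symm)
  have hcount_dropc : drop.count c = 0 :=
    List.count_eq_zero.mpr (fun h => lt_irrefl c (hgt c h))
  refine ⟨?_, hpd, hrunc, ?_⟩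
  · rw [List.count_cons_self, ← hsplit, List.count_append, hcount_run, hcount_dropc]
    omega
  · intro x hx
    have hxne : x ≠ c := fun h => lt_irrefl c (h ▸ hgt x hx)
    refine ⟨hxne, ?_⟩
    rw [List.count_cons_of_ne hxne.symm, ← hsplit, List.count_append,
      List.count_eq_zero.mpr (fun h => hxne (hrunc x h)), Nat.zero_add]

lemma runScan_iff (count : Int) :
    ∀ (s : List Char), s.Pairwise (· ≤ ·) →
      (runScan count s = true ↔ ∃ c ∈ s, (s.count c : Int) = count) := by
  intro s
  induction s using runScan.induct count with
  | case1 => simp [runScan]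
  | case2 c rest run hcond =>
    intro hp
    obtain ⟨hcc, _, _, _⟩ := run_facts c rest hp
    have hcond : 1 + ((rest.takeWhile (fun x => x == c)).length : Int) = count :=
      beq_iff_eq.mp hcond
    rw [runScan]
    split
    · constructor
      · intro _
        exact ⟨c, List.mem_cons_self, by rw [hcc]; push_cast; omega⟩
      · intro _; rfl
    · rename_i hfalse
      exact absurd (by simp [hcond]) hfalse
  | case3 c rest run hcond ih =>
    intro hp
    obtain ⟨hcc, hpd, hrunc, hdropfacts⟩ := run_facts c rest hp
    have hcond : ¬ (1 + ((rest.takeWhile (fun x => x == c)).length : Int) = count) :=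
      fun h => hcond (beq_iff_eq.mpr h)
    rw [runScan]
    split
    · rename_i htrue
      exact absurd (by simpa using htrue) hcond
    · rw [ih hpd]
      have hsplit : rest.takeWhile (fun x => x == c) ++ rest.dropWhile (fun x => x == c) = rest :=
        List.takeWhile_append_dropWhile
      constructor
      · rintro ⟨x, hx, hc⟩
        refine ⟨x, ?_, ?_⟩
        · exact List.mem_cons_of_mem c (by rw [← hsplit]; exact List.mem_append_right _ hx)
        · rw [(hdropfacts x hx).2]; exact hc
      · rintro ⟨x, hx, hc⟩
        rcases List.mem_cons.mp hx with rfl | hx'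
        · exact absurd (by rw [hcc] at hc; push_cast at hc; omega) hcond
        · rw [← hsplit] at hx'
          rcases List.mem_append.mp hx' with hr | hd
          · refine absurd ?_ hcond
            have := hrunc x hr
            subst this
            rw [hcc] at hc; push_cast at hc; omega
          · exact ⟨x, hd, by rw [← (hdropfacts x hd).2]; exact hc⟩

lemma hasExactly_alt_true_iff (s : String) (count : Int) :
    hasExactly_alt s count = true ↔ ∃ c ∈ s.toList, (s.toList.count c : Int) = count := by
  unfold hasExactly_alt
  have hperm : (PySem.List.sorted s.toList (fun x => x) false).Perm s.toList :=
    PySem.List.sorted_perm s.toList (fun x => x) false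
  have hpair : (PySem.List.sorted s.toList (fun x => x) false).Pairwise (· ≤ ·) :=
    PySem.List.sorted_pairwise s.toList (fun x => x)
  rw [runScan_iff count _ hpair]
  constructor <;> rintro ⟨c, hm, hc⟩
  · exact ⟨c, hperm.mem_iff.mp hm, by rw [← hperm.count_eq]; exact hc⟩
  · exact ⟨c, hperm.mem_iff.mpr hm, by rw [hperm.count_eq]; exact hc⟩

-- ===== VERDICT (by name: the statement is the Claim_ definition above) =====
theorem hasExactly_spec : Claim_equal_hasExactly := by
  intro s count _
  unfold Spec_hasExactly
  rw [Bool.eq_iff_iff, hasExactly_true_iff, hasExactly_alt_true_iff]
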